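-- pv_equiv track=rewrite | github.com/JHLubin/klab | protease_design/early_scripts/design_protease_pre-general.py | cleanhead
-- ===== SOURCE A (Python) =====
-- def cleanhead(header):
-- 	"""
-- 	When using pose.energies(), the lengths of some score terms are long
-- 	enough that they run into each other. Consequently, the split() method
-- 	doesn't separate them correctly. This function takes a header line and
-- 	cleans up any such clashes identified in ref2015_cst. The reason I bother
-- 	is to accommodate the possibility of cst/no cst, in which case the
-- 	indexing of the energies table changes.
-- 	"""
-- 	for n, i in enumerate(header):
-- 		# Cleaning up string length clashes
-- 		if i == 'fa_intra_repfa_intra_sol_xo':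
-- 			header[n] = 'fa_intra_rep'
-- 			header.insert(n+1, 'fa_intra_sol_xover4')
-- 		if i == 'dslf_fa13atom_pair_constcoordinate_consangle_constraindihedral_constr':
-- 			header[n] = 'dslf_fa13'
-- 			header.insert(n+1, 'atom_pair_constraint')
-- 			header.insert(n+2, 'coordinate_constraint')
-- 			header.insert(n+3, 'angle_constraint')
-- 			header.insert(n+3, 'dihedral_constraint')
-- 		if i == 'rama_preprores_type_constr':
-- 			header[n] = 'rama_prepro'
-- 			header.insert(n+1, 'res_type_constraint')
--
-- 	return header
-- ===== SOURCE B (Python) =====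
-- _TABLE = {
--     'fa_intra_repfa_intra_sol_xo':
--         ['fa_intra_rep', 'fa_intra_sol_xover4'],
--     'dslf_fa13atom_pair_constcoordinate_consangle_constraindihedral_constr':
--         ['dslf_fa13', 'atom_pair_constraint', 'coordinate_constraint',
--          'dihedral_constraint', 'angle_constraint'],
--     'rama_preprores_type_constr':
--         ['rama_prepro', 'res_type_constraint'],
-- }
--
-- def cleanhead(header):
--     out = []
--     for token in header:
--         out.extend(_TABLE.get(token, [token]))
--     header[:] = out
--     return header
-- ===== Notes on version B (the rewrite author's own statement) =====
-- stated objective: simpler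
-- what changed: Replaces the in-place index-shifting enumerate/insert loop with a lookup table mapping each merged header token to its ordered expansion, built into a fresh list in one pass and written back with header[:] = out.
import Mathlib
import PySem

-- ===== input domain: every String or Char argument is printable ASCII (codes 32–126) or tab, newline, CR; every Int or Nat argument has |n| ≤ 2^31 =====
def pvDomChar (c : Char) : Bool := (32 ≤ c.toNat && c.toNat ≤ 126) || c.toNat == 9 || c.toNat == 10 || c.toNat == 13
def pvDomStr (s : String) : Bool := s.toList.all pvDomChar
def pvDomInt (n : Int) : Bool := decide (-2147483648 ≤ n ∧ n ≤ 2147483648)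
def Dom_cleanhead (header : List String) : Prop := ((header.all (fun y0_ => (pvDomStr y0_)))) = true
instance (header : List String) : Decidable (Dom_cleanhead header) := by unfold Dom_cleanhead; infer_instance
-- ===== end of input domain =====

-- B replaces A's enumerate/insert index-shifting mutation with a token→expansion
-- lookup table and one extend pass (objective: simpler). Both Pythons mutate the
-- argument list in place the same way; the theorems are about the return value.

-- ===== PORT A =====
-- weight used only to justify termination of A's loop (inserts grow the list)
def pvW1 (s : String) : Nat :=
  if s = "dslf_fa13atom_pair_constcoordinate_consangle_constraindihedral_constr" then 5
  else if s = "fa_intra_repfa_intra_sol_xo" then 2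
  else if s = "rama_preprores_type_constr" then 2
  else 1

def pvW (xs : List String) : Nat := (xs.map pvW1).sum

-- A's loop: enumerate walks the live list, so after an insert the next
-- iteration looks at the first inserted element; inserts are modeled by
-- consing the inserted tokens onto the remaining suffix.
def cleanheadLoop : List String → List String
  | [] => []
  | i :: rest =>
    if i = "fa_intra_repfa_intra_sol_xo" then
      "fa_intra_rep" :: cleanheadLoop ("fa_intra_sol_xover4" :: rest)
    else if i = "dslf_fa13atom_pair_constcoordinate_consangle_constraindihedral_constr" then
      "dslf_fa13" :: cleanheadLoop ("atom_pair_constraint" :: "coordinate_constraint" ::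
        "dihedral_constraint" :: "angle_constraint" :: rest)
    else if i = "rama_preprores_type_constr" then
      "rama_prepro" :: cleanheadLoop ("res_type_constraint" :: rest)
    else
      i :: cleanheadLoop rest
  termination_by xs => pvW xs
  decreasing_by
    all_goals simp [pvW, pvW1, *] <;> omega

def cleanhead (header : List String) : List String := cleanheadLoop header

-- ===== PORT B =====
def pvTable : PySem.Dict String (List String) :=
  PySem.Dict.ofList
  [("fa_intra_repfa_intra_sol_xo",
      ["fa_intra_rep", "fa_intra_sol_xover4"]),
   ("dslf_fa13atom_pair_constcoordinate_consangle_constraindihedral_constr",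
      ["dslf_fa13", "atom_pair_constraint", "coordinate_constraint",
       "dihedral_constraint", "angle_constraint"]),
   ("rama_preprores_type_constr",
      ["rama_prepro", "res_type_constraint"])]

def cleanhead_alt (header : List String) : List String :=
  header.foldl (fun out token => out ++ PySem.Dict.getD pvTable token [token]) []

-- ===== PRECONDITION & SPEC =====
def Spec_cleanhead (header : List String) (out : List String) : Prop := out = cleanhead_alt header
instance (header : List String) (out : List String) : Decidable (Spec_cleanhead header out) := by unfold Spec_cleanhead; infer_instance

-- ===== CLAIM (what is proved, stated in full; the proofs are below) =====
def Claim_equal_cleanhead : Prop := ∀ (header : List String), Dom_cleanhead header → Spec_cleanhead header (cleanhead header)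

-- ===== LEMMAS AND PROOFS =====
def pvExpand (t : String) : List String := PySem.Dict.getD pvTable t [t]

theorem pvExpand_tok :
    pvExpand "fa_intra_repfa_intra_sol_xo" = ["fa_intra_rep", "fa_intra_sol_xover4"] ∧
    pvExpand "dslf_fa13atom_pair_constcoordinate_consangle_constraindihedral_constr" =
      ["dslf_fa13", "atom_pair_constraint", "coordinate_constraint",
       "dihedral_constraint", "angle_constraint"] ∧
    pvExpand "rama_preprores_type_constr" = ["rama_prepro", "res_type_constraint"] ∧
    pvExpand "fa_intra_sol_xover4" = ["fa_intra_sol_xover4"] ∧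
    pvExpand "atom_pair_constraint" = ["atom_pair_constraint"] ∧
    pvExpand "coordinate_constraint" = ["coordinate_constraint"] ∧
    pvExpand "dihedral_constraint" = ["dihedral_constraint"] ∧
    pvExpand "angle_constraint" = ["angle_constraint"] ∧
    pvExpand "res_type_constraint" = ["res_type_constraint"] := by
  decide

theorem pvExpand_other (t : String)
    (h1 : ¬ t = "fa_intra_repfa_intra_sol_xo")
    (h2 : ¬ t = "dslf_fa13atom_pair_constcoordinate_consangle_constraindihedral_constr")
    (h3 : ¬ t = "rama_preprores_type_constr") :
    pvExpand t = [t] := by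
  have ht : pvTable = PySem.Dict.mk
      [("fa_intra_repfa_intra_sol_xo", ["fa_intra_rep", "fa_intra_sol_xover4"]),
       ("dslf_fa13atom_pair_constcoordinate_consangle_constraindihedral_constr",
         ["dslf_fa13", "atom_pair_constraint", "coordinate_constraint",
          "dihedral_constraint", "angle_constraint"]),
       ("rama_preprores_type_constr", ["rama_prepro", "res_type_constraint"])] := by decide
  simp [pvExpand, ht, PySem.Dict.getD, PySem.Dict.get?,
        Ne.symm h1, Ne.symm h2, Ne.symm h3]

theorem cleanheadLoop_eq_flatMap (xs : List String) :
    cleanheadLoop xs = xs.flatMap pvExpand := by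
  fun_induction cleanheadLoop xs <;>
    simp_all [List.flatMap_cons, pvExpand_tok, pvExpand_other]

-- ===== VERDICT (by name: the statement is the Claim_ definition above) =====
theorem cleanhead_spec : Claim_equal_cleanhead := by
  intro header _
  unfold Spec_cleanhead cleanhead cleanhead_alt
  rw [PySem.List.foldl_append_eq_flatMap]
  simpa [pvExpand] using cleanheadLoop_eq_flatMap header
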